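-- pv_equiv track=rewrite | github.com/leharris3/birdnoise | NatureLM-audio/inference_web_app.py | to_raven_format
-- ===== SOURCE A (Python) =====
-- def to_raven_format(outputs: dict[int, str], chunk_len: int = 10) -> str:
--     def get_line(row, start, end, annotation):
--         return f"{row}\tSpectrogram 1\t1\t{start}\t{end}\t0\t8000\t{annotation}"
--
--     raven_output = ["Selection\tView\tChannel\tBegin Time (s)\tEnd Time (s)\tLow Freq (Hz)\tHigh Freq (Hz)\tAnnotation"]
--     current_offset = 0
--     last_label = ""
--     row = 1
--
--     # The "Selection" column is just the row number.
--     # The "view" column will always say "Spectrogram 1".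
--     # Channel can always be "1".
--     # For the frequency bounds we can just use 0 and 1/2 the sample rate
--     for offset, label in sorted(outputs.items()):
--         if label != last_label and last_label:
--             raven_output.append(get_line(row, current_offset, offset, last_label))
--             current_offset = offset
--             row += 1
--         if not last_label:
--             current_offset = offset
--         if label != "None":
--             last_label = label
--         else:
--             last_label = ""
--     if last_label:
--         raven_output.append(get_line(row, current_offset, current_offset + chunk_len, last_label))
--
--     return "\n".join(raven_output)
-- ===== SOURCE B (Python) =====
-- def to_raven_format(outputs: dict[int, str], chunk_len: int = 10) -> str:
--     def get_line(row, start, end, annotation):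
--         return f"{row}\tSpectrogram 1\t1\t{start}\t{end}\t0\t8000\t{annotation}"
--
--     # Phase 1: runs of consecutive equal labels in key order -> (start_offset, label)
--     groups = []
--     for offset, label in sorted(outputs.items()):
--         if not groups or groups[-1][1] != label:
--             groups.append((offset, label))
--
--     # Phase 2: one line per labelled run; a run ends where the next run begins,
--     # the final run ends chunk_len after its own start.
--     lines = ["Selection\tView\tChannel\tBegin Time (s)\tEnd Time (s)\tLow Freq (Hz)\tHigh Freq (Hz)\tAnnotation"]
--     row = 1
--     for i, (start, label) in enumerate(groups):
--         if label == "None" or label == "":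
--             continue
--         end = groups[i + 1][0] if i + 1 < len(groups) else start + chunk_len
--         lines.append(get_line(row, start, end, label))
--         row += 1
--     return "\n".join(lines)
-- ===== Notes on version B (the rewrite author's own statement) =====
-- stated objective: alternative
-- what changed: Replaces A's single stateful sweep (carrying last_label/current_offset/row across items and a final flush) by a two-phase decomposition: first group the sorted items into runs of equal labels, then emit one line per labelled run, taking each run's end from the next run's start (or start+chunk_len for the last run).
import Mathlib
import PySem

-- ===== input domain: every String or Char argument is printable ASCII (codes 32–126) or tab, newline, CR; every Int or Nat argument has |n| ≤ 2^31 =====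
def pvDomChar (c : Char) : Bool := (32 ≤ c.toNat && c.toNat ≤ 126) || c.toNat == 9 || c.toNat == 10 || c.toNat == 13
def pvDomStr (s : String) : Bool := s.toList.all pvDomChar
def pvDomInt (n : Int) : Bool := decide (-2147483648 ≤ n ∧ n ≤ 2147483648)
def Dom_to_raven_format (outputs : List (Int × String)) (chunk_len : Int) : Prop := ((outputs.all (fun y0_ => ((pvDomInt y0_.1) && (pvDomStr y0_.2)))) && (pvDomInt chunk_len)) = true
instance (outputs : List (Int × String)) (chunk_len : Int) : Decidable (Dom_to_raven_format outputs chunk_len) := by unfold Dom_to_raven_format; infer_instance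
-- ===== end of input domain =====

-- B replaces A's single stateful sweep (carried last_label/current_offset/row) by a two-phase
-- decomposition: first group the sorted items into runs of equal labels, then emit one line per
-- labelled run with a lookahead to the next run's start; same output, same O(n log n) cost.

-- ===== PORT A =====
def pvHeaderA : String := "Selection\tView\tChannel\tBegin Time (s)\tEnd Time (s)\tLow Freq (Hz)\tHigh Freq (Hz)\tAnnotation"

def pvGetLineA (row : Int) (start : Int) (end_ : Int) (annotation : String) : String :=
  PySem.Int.toStr row ++ "\tSpectrogram 1\t1\t" ++ PySem.Int.toStr start ++ "\t" ++
    PySem.Int.toStr end_ ++ "\t0\t8000\t" ++ annotation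

-- one iteration of A's for-loop over (raven_output, current_offset, last_label, row)
def pvStepA (s : List String × Int × String × Int) (p : Int × String) : List String × Int × String × Int :=
  let out := s.1; let cur := s.2.1; let last := s.2.2.1; let row := s.2.2.2
  let offset := p.1; let label := p.2
  let t : List String × Int × Int :=
    if label ≠ last ∧ last ≠ "" then (out ++ [pvGetLineA row cur offset last], offset, row + 1)
    else (out, cur, row)
  -- note: Python's second 'if' tests the OLD last_label (unchanged so far), so 'last' here
  let cur3 := if last = "" then offset else t.2.1
  let last2 := if label ≠ "None" then label else ""
  (t.1, cur3, last2, t.2.2)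

def to_raven_format (outputs : List (Int × String)) (chunk_len : Int) : String :=
  let st := (PySem.List.sorted2 outputs (fun p => p.1) (fun p => p.2)).foldl pvStepA ([pvHeaderA], 0, "", 1)
  let out := if st.2.2.1 ≠ "" then st.1 ++ [pvGetLineA st.2.2.2 st.2.1 (st.2.1 + chunk_len) st.2.2.1] else st.1
  PySem.Str.join "\n" out

-- ===== PORT B =====
def pvHeaderB : String := "Selection\tView\tChannel\tBegin Time (s)\tEnd Time (s)\tLow Freq (Hz)\tHigh Freq (Hz)\tAnnotation"

def pvGetLineB (row : Int) (start : Int) (end_ : Int) (annotation : String) : String :=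
  PySem.Int.toStr row ++ "\tSpectrogram 1\t1\t" ++ PySem.Int.toStr start ++ "\t" ++
    PySem.Int.toStr end_ ++ "\t0\t8000\t" ++ annotation

-- Phase 1 of Source B: groups[-1] is the last element of the accumulator
def pvBuildGroups (items : List (Int × String)) : List (Int × String) :=
  items.foldl (fun gs p => if gs = [] ∨ gs.getLast?.map Prod.snd ≠ some p.2 then gs ++ [p] else gs) []

-- Phase 2 of Source B: 'groups[i+1][0] if i+1 < len(groups) else start + chunk_len' is the
-- lookahead at the head of the remaining groups
def pvEmitGroups (chunk_len : Int) : List (Int × String) → Int → List String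
  | [], _ => []
  | (start, label) :: rest, row =>
    if label = "None" ∨ label = "" then pvEmitGroups chunk_len rest row
    else pvGetLineB row start (match rest with | [] => start + chunk_len | (s2, _) :: _ => s2) label
           :: pvEmitGroups chunk_len rest (row + 1)

def to_raven_format_alt (outputs : List (Int × String)) (chunk_len : Int) : String :=
  PySem.Str.join "\n"
    (pvHeaderB :: pvEmitGroups chunk_len
      (pvBuildGroups (PySem.List.sorted2 outputs (fun p => p.1) (fun p => p.2))) 1)

-- ===== PRECONDITION & SPEC =====
def Spec_to_raven_format (outputs : List (Int × String)) (chunk_len : Int) (out : String) : Prop := out = to_raven_format_alt outputs chunk_len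
instance (outputs : List (Int × String)) (chunk_len : Int) (out : String) : Decidable (Spec_to_raven_format outputs chunk_len out) := by unfold Spec_to_raven_format; infer_instance

-- ===== CLAIM (what is proved, stated in full; the proofs are below) =====
def Claim_equal_to_raven_format : Prop := ∀ (outputs : List (Int × String)) (chunk_len : Int), Dom_to_raven_format outputs chunk_len → Spec_to_raven_format outputs chunk_len (to_raven_format outputs chunk_len)

-- ===== LEMMAS AND PROOFS =====

-- the lines A's loop + final flush appends after out, as a structural recursion on the items
def pvLinesA (chunk_len : Int) : List (Int × String) → Int → String → Int → List String
  | [], cur, last, row => if last ≠ "" then [pvGetLineA row cur (cur + chunk_len) last] else []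
  | (o, l) :: rest, cur, last, row =>
    if l ≠ last ∧ last ≠ "" then
      pvGetLineA row cur o last :: pvLinesA chunk_len rest o (if l ≠ "None" then l else "") (row + 1)
    else
      pvLinesA chunk_len rest (if last = "" then o else cur) (if l ≠ "None" then l else "") row

-- runs of the remaining items, given the label of the current run
def pvGroupsFrom (last : String) : List (Int × String) → List (Int × String)
  | [] => []
  | (o, l) :: rest => if l = last then pvGroupsFrom last rest else (o, l) :: pvGroupsFrom l rest

theorem pvGetLine_eq (row start end_ : Int) (a : String) :
    pvGetLineB row start end_ a = pvGetLineA row start end_ a := rfl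

theorem pvFoldA_eq_linesA (chunk_len : Int) (items : List (Int × String)) :
    ∀ (out : List String) (cur : Int) (last : String) (row : Int),
    (let st := items.foldl pvStepA (out, cur, last, row)
     if st.2.2.1 ≠ "" then st.1 ++ [pvGetLineA st.2.2.2 st.2.1 (st.2.1 + chunk_len) st.2.2.1] else st.1)
    = out ++ pvLinesA chunk_len items cur last row := by
  induction items with
  | nil =>
    intro out cur last row
    simp only [List.foldl_nil, pvLinesA]
    split_ifs <;> simp
  | cons p rest ih =>
    intro out cur last row
    obtain ⟨o, l⟩ := p
    simp only [List.foldl_cons, pvLinesA, pvStepA]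
    by_cases h : l ≠ last ∧ last ≠ ""
    · have hlast : ¬ (last = "") := h.2
      simp only [if_pos h]
      rw [ih]
      simp
    · simp only [if_neg h]
      rw [ih]

theorem pvBuildGroups_inv (items : List (Int × String)) :
    ∀ (pre : List (Int × String)) (g : Int × String),
    items.foldl (fun gs p => if gs = [] ∨ gs.getLast?.map Prod.snd ≠ some p.2 then gs ++ [p] else gs) (pre ++ [g])
    = (pre ++ [g]) ++ pvGroupsFrom g.2 items := by
  induction items with
  | nil => intro pre g; simp [pvGroupsFrom]
  | cons p rest ih =>
    intro pre g
    obtain ⟨o, l⟩ := p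
    simp only [List.foldl_cons, pvGroupsFrom]
    by_cases h : l = g.2
    · have : ¬ (pre ++ [g] = [] ∨ (pre ++ [g]).getLast?.map Prod.snd ≠ some l) := by
        simp [List.getLast?_append, h]
      rw [if_neg this, if_pos h, ih]
    · have : pre ++ [g] = [] ∨ (pre ++ [g]).getLast?.map Prod.snd ≠ some l := by
        simp [List.getLast?_append]
        exact fun hh => h hh.symm
      rw [if_pos this, if_neg h]
      have := ih (pre ++ [g]) (o, l)
      simp only [List.append_assoc, List.cons_append, List.nil_append] at this ⊢
      rw [this]

-- equation helpers for the recursions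
theorem pvGroupsFrom_cons_eq (last : String) (o : Int) (l : String) (rest : List (Int × String))
    (h : l = last) : pvGroupsFrom last ((o, l) :: rest) = pvGroupsFrom last rest := by
  simp [pvGroupsFrom, h]

theorem pvGroupsFrom_cons_ne (last : String) (o : Int) (l : String) (rest : List (Int × String))
    (h : l ≠ last) : pvGroupsFrom last ((o, l) :: rest) = (o, l) :: pvGroupsFrom l rest := by
  simp [pvGroupsFrom, h]

theorem pvEmitGroups_skip (c s : Int) (l : String) (rest : List (Int × String)) (row : Int)
    (h : l = "None" ∨ l = "") : pvEmitGroups c ((s, l) :: rest) row = pvEmitGroups c rest row := by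
  have he : pvEmitGroups c ((s, l) :: rest) row
      = if l = "None" ∨ l = "" then pvEmitGroups c rest row
        else pvGetLineB row s (match rest with | [] => s + c | (s2, _) :: _ => s2) l
               :: pvEmitGroups c rest (row + 1) := rfl
  rw [he, if_pos h]

theorem pvEmitGroups_last (c s : Int) (X : String) (row : Int) (hX : X ≠ "") (hXn : X ≠ "None") :
    pvEmitGroups c [(s, X)] row = [pvGetLineB row s (s + c) X] := by
  have he : pvEmitGroups c [(s, X)] row
      = if X = "None" ∨ X = "" then pvEmitGroups c [] row
        else pvGetLineB row s (s + c) X :: pvEmitGroups c [] (row + 1) := rfl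
  rw [he, if_neg (by simp [hX, hXn])]
  rfl

theorem pvEmitGroups_cons_cons (c s : Int) (X : String) (o : Int) (l : String)
    (gs : List (Int × String)) (row : Int) (hX : X ≠ "") (hXn : X ≠ "None") :
    pvEmitGroups c ((s, X) :: (o, l) :: gs) row
      = pvGetLineB row s o X :: pvEmitGroups c ((o, l) :: gs) (row + 1) := by
  have he : pvEmitGroups c ((s, X) :: (o, l) :: gs) row
      = if X = "None" ∨ X = "" then pvEmitGroups c ((o, l) :: gs) row
        else pvGetLineB row s o X :: pvEmitGroups c ((o, l) :: gs) (row + 1) := rfl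
  rw [he, if_neg (by simp [hX, hXn])]

theorem pvDeadLast (l : String) (h : l = "" ∨ l = "None") :
    (if l ≠ "None" then l else "") = "" := by
  rcases h with h | h <;> simp [h]

theorem pvLiveLast (l : String) (h : l ≠ "None") :
    (if l ≠ "None" then l else "") = l := by simp [h]

-- simultaneous simulation: A's remaining-lines function against B's per-run emission
theorem pvSim (chunk_len : Int) (items : List (Int × String)) :
    (∀ (cur row : Int) (d : String), (d = "" ∨ d = "None") →
        pvLinesA chunk_len items cur "" row = pvEmitGroups chunk_len (pvGroupsFrom d items) row)
    ∧ (∀ (cur row : Int) (X : String), X ≠ "" → X ≠ "None" →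
        pvLinesA chunk_len items cur X row
          = pvEmitGroups chunk_len ((cur, X) :: pvGroupsFrom X items) row) := by
  induction items with
  | nil =>
    constructor
    · intro cur row d _; simp [pvLinesA, pvGroupsFrom, pvEmitGroups]
    · intro cur row X hX hXn
      rw [show pvGroupsFrom X ([] : List (Int × String)) = [] from rfl,
        pvEmitGroups_last chunk_len cur X row hX hXn]
      simp [pvLinesA, hX, pvGetLine_eq]
  | cons p rest ih =>
    obtain ⟨o, l⟩ := p
    obtain ⟨ih1, ih2⟩ := ih
    constructor
    · intro cur row d hd
      have hstep : pvLinesA chunk_len ((o, l) :: rest) cur "" row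
          = pvLinesA chunk_len rest o (if l ≠ "None" then l else "") row := by
        simp [pvLinesA]
      rw [hstep]
      by_cases hld : l = d
      · have hdead : l = "" ∨ l = "None" := by rcases hd with h | h <;> rw [hld, h] <;> simp
        rw [pvDeadLast l hdead, pvGroupsFrom_cons_eq d o l rest hld]
        exact ih1 o row d hd
      · rw [pvGroupsFrom_cons_ne d o l rest hld]
        by_cases hdead : l = "" ∨ l = "None"
        · rw [pvDeadLast l hdead,
            pvEmitGroups_skip chunk_len o l (pvGroupsFrom l rest) row (hdead.symm.imp id id)]
          exact ih1 o row l hdead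
        · push_neg at hdead
          rw [pvLiveLast l hdead.2]
          exact ih2 o row l hdead.1 hdead.2
    · intro cur row X hX hXn
      by_cases hlX : l = X
      · subst hlX
        have hstep : pvLinesA chunk_len ((o, l) :: rest) cur l row
            = pvLinesA chunk_len rest cur l row := by
          simp [pvLinesA, hX, pvLiveLast l hXn]
        rw [hstep, pvGroupsFrom_cons_eq l o l rest rfl]
        exact ih2 cur row l hX hXn
      · have hstep : pvLinesA chunk_len ((o, l) :: rest) cur X row
            = pvGetLineA row cur o X :: pvLinesA chunk_len rest o (if l ≠ "None" then l else "") (row + 1) := by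
          simp [pvLinesA, hlX, hX]
        rw [hstep, pvGroupsFrom_cons_ne X o l rest hlX,
          pvEmitGroups_cons_cons chunk_len cur X o l (pvGroupsFrom l rest) row hX hXn,
          pvGetLine_eq]
        congr 1
        by_cases hdead : l = "" ∨ l = "None"
        · rw [pvDeadLast l hdead,
            pvEmitGroups_skip chunk_len o l (pvGroupsFrom l rest) (row + 1) (hdead.symm.imp id id)]
          exact ih1 o (row + 1) l hdead
        · push_neg at hdead
          rw [pvLiveLast l hdead.2]
          exact ih2 o (row + 1) l hdead.1 hdead.2

-- ===== VERDICT (by name: the statement is the Claim_ definition above) =====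
theorem to_raven_format_spec : Claim_equal_to_raven_format := by
  intro outputs chunk_len _
  unfold Spec_to_raven_format to_raven_format to_raven_format_alt
  set items := PySem.List.sorted2 outputs (fun p => p.1) (fun p => p.2) with hitems
  clear hitems
  have hA := pvFoldA_eq_linesA chunk_len items [pvHeaderA] 0 "" 1
  simp only at hA ⊢
  rw [hA]
  have hH : pvHeaderA = pvHeaderB := rfl
  cases items with
  | nil =>
    simp [pvLinesA, pvBuildGroups, pvEmitGroups, hH]
  | cons p rest =>
    obtain ⟨o, l⟩ := p
    have hB : pvBuildGroups ((o, l) :: rest) = (o, l) :: pvGroupsFrom l rest := by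
      unfold pvBuildGroups
      simp only [List.foldl_cons, List.nil_append]
      have := pvBuildGroups_inv rest [] (o, l)
      simpa using this
    rw [hB]
    have hstep : pvLinesA chunk_len ((o, l) :: rest) 0 "" 1
        = pvLinesA chunk_len rest o (if l ≠ "None" then l else "") 1 := by
      simp [pvLinesA]
    rw [hstep, hH]
    simp only [List.singleton_append]
    by_cases hdead : l = "" ∨ l = "None"
    · rw [pvDeadLast l hdead,
        pvEmitGroups_skip chunk_len o l (pvGroupsFrom l rest) 1 (hdead.symm.imp id id)]
      exact congrArg (fun x => PySem.Str.join "\n" (pvHeaderB :: x)) ((pvSim chunk_len rest).1 o 1 l hdead)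
    · push_neg at hdead
      rw [pvLiveLast l hdead.2]
      exact congrArg (fun x => PySem.Str.join "\n" (pvHeaderB :: x)) ((pvSim chunk_len rest).2 o 1 l hdead.1 hdead.2)
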